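-- pv_equiv track=rewrite | github.com/WhalesBob/AlgorithmSolving | 백준/Gold/1005. ACM Craft/ACM Craft.py | get_need_build
-- ===== SOURCE A (Python) =====
-- from collections import deque
--
-- def get_need_build(target, set_list):
--     result_set, need_queue = set(), deque()
--     need_queue.append(target)
--     result_set.add(target)
--
--     while len(need_queue) > 0:
--         element = need_queue.popleft()
--
--         for e in set_list[element]:
--             if e not in result_set:
--                 result_set.add(e)
--                 need_queue.append(e)
--
--     return result_set
-- ===== SOURCE B (Python) =====
-- def get_need_build(target, set_list):
--     # Round-based closure: repeatedly sweep the ordered result list and append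
--     # every newly reachable node, until a full sweep adds nothing.
--     result = [target]
--     while True:
--         new = []
--         for x in result:
--             for e in set_list[x]:
--                 if e not in result and e not in new:
--                     new.append(e)
--         if not new:
--             return set(result)
--         result += new
-- ===== Notes on version B (the rewrite author's own statement) =====
-- stated objective: alternative
-- what changed: Replaces A's deque-based BFS worklist by a round-based closure: repeatedly sweep the ordered result list, appending every newly reachable neighbour, until a full sweep adds nothing.
import Mathlib
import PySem

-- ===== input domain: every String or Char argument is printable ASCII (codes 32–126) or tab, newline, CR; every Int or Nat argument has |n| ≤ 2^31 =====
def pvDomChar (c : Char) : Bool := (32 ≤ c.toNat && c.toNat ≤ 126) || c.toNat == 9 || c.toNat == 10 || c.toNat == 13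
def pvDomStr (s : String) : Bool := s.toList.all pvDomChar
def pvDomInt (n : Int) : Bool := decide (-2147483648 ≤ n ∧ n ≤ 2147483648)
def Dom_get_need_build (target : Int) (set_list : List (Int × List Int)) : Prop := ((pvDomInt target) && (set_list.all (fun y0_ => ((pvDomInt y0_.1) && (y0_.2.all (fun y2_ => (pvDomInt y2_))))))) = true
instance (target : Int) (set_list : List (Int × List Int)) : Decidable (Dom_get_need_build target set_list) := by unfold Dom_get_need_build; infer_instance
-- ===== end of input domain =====

-- B replaces A's deque-based BFS by a round-based closure sweep (re-scan the ordered
-- result list and append what is newly reachable, until a sweep adds nothing); same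
-- return value, different algorithm ('alternative', no speed claim).

-- ===== PORT A =====
-- while need_queue: pop left; for e in set_list[element]: if e not in result_set: add+enqueue.
-- The Nat fuel is only a totality guard: the loop pops at most 1 + Σ|adjacency| elements
-- (each pop was an enqueue, each enqueue inserts a fresh element of the value lists).
def pvBfsA (nbr : Int → List Int) : Nat → List Int → PySem.Set Int → PySem.Set Int
  | 0, _, s => s
  | _ + 1, [], s => s
  | f + 1, x :: qs, s =>
    let p := (nbr x).foldl
      (fun (sq : PySem.Set Int × List Int) e =>
        if PySem.Set.contains sq.1 e then sq else (PySem.Set.add sq.1 e, sq.2 ++ [e]))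
      (s, qs)
    pvBfsA nbr f p.2 p.1

def get_need_build (target : Int) (set_list : List (Int × List Int)) : List Int :=
  -- set_list[element] is Python dict lookup; Pre_ guarantees the key is present, so getD is exact
  let d := PySem.Dict.ofList set_list
  let fuel := 1 + (set_list.map (fun p => p.2.length)).sum
  pvBfsA (fun x => d.getD x []) fuel [target] (PySem.Set.add PySem.Set.empty target)

-- ===== PORT B =====
-- one sweep of Source B's while-body: for x in result: for e in set_list[x]:
--   if e not in result and e not in new: new.append(e)
def pvRoundNew (nbr : Int → List Int) (result : List Int) : List Int :=
  result.foldl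
    (fun new x =>
      (nbr x).foldl (fun new e => if e ∈ result ∨ e ∈ new then new else new ++ [e]) new)
    []

-- while True: new := sweep; if not new: stop; result += new.  Fuel = totality guard only
-- (each successful sweep appends at least one fresh element of the value lists).
def pvRounds (nbr : Int → List Int) : Nat → List Int → List Int
  | 0, r => r
  | f + 1, r =>
    let new := pvRoundNew nbr r
    if new = [] then r else pvRounds nbr f (r ++ new)

def get_need_build_alt (target : Int) (set_list : List (Int × List Int)) : List Int :=
  let d := PySem.Dict.ofList set_list
  let fuel := 1 + (set_list.map (fun p => p.2.length)).sum
  PySem.Set.ofList (pvRounds (fun x => d.getD x []) fuel [target])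

-- ===== PRECONDITION & SPEC =====
-- Pre_ holds iff target lies in some value-closed subset of set_list's keys, i.e. iff
-- every node reachable from target is a key of set_list: exactly the inputs on which
-- the Python get_need_build returns normally (it raises KeyError otherwise).
def Pre_get_need_build (target : Int) (set_list : List (Int × List Int)) : Prop :=
  ∃ S ∈ (set_list.map (fun p => p.1)).sublists,
    target ∈ S ∧ ∀ p ∈ set_list, p.1 ∈ S → ∀ v ∈ p.2, v ∈ S
instance (target : Int) (set_list : List (Int × List Int)) : Decidable (Pre_get_need_build target set_list) := by unfold Pre_get_need_build; infer_instance

def pvWitness_get_need_build : Int × (List (Int × List Int)) := (0, [(0, [1]), (1, [])])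

def Spec_get_need_build (target : Int) (set_list : List (Int × List Int)) (out : List Int) : Prop := out = get_need_build_alt target set_list
instance (target : Int) (set_list : List (Int × List Int)) (out : List Int) : Decidable (Spec_get_need_build target set_list out) := by unfold Spec_get_need_build; infer_instance

-- ===== CLAIM (what is proved, stated in full; the proofs are below) =====
def Claim_equal_get_need_build : Prop := ∀ (target : Int) (set_list : List (Int × List Int)), Dom_get_need_build target set_list → Pre_get_need_build target set_list → Spec_get_need_build target set_list (get_need_build target set_list)

-- ===== LEMMAS AND PROOFS =====

-- the list of elements of ns that are fresh w.r.t. s, first occurrences, in order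
def pvFresh (s : List Int) : List Int → List Int
  | [] => []
  | e :: ns => if e ∈ s then pvFresh s ns else e :: pvFresh (s ++ [e]) ns

def pvCat (nbr : Int → List Int) (xs : List Int) : List Int := xs.flatMap nbr

theorem pvFresh_append (s a b : List Int) :
    pvFresh s (a ++ b) = pvFresh s a ++ pvFresh (s ++ pvFresh s a) b := by
  induction a generalizing s with
  | nil => simp [pvFresh]
  | cons e a ih =>
    by_cases h : e ∈ s <;> simp [pvFresh, h, ih]

theorem pvFresh_nil_of_subset {s ns : List Int} (h : ∀ e ∈ ns, e ∈ s) :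
    pvFresh s ns = [] := by
  induction ns with
  | nil => rfl
  | cons e ns ih =>
    have he : e ∈ s := h e (by simp)
    simp only [pvFresh, he, if_pos]
    exact ih fun x hx => h x (by simp [hx])

theorem mem_pvFresh {e : Int} {s ns : List Int} (h : e ∈ pvFresh s ns) :
    e ∈ ns ∧ e ∉ s := by
  induction ns generalizing s with
  | nil => simp [pvFresh] at h
  | cons x ns ih =>
    by_cases hx : x ∈ s
    · simp only [pvFresh, hx, if_pos] at h
      rcases ih h with ⟨h1, h2⟩
      exact ⟨by simp [h1], h2⟩
    · simp only [pvFresh, hx] at h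
      cases h with
      | head => exact ⟨by simp, hx⟩
      | tail _ h =>
        obtain ⟨h1, h2⟩ := ih (s := s ++ [x]) h
        simp only [List.mem_append, List.mem_singleton] at h2
        exact ⟨by simp [h1], fun hc => h2 (Or.inl hc)⟩

theorem mem_or_mem_pvFresh {e : Int} {s ns : List Int} (h : e ∈ ns) :
    e ∈ s ∨ e ∈ pvFresh s ns := by
  induction ns generalizing s with
  | nil => simp at h
  | cons x ns ih =>
    rcases List.mem_cons.mp h with rfl | h
    · by_cases hx : e ∈ s
      · exact Or.inl hx
      · simp [pvFresh, hx]
    · by_cases hx : x ∈ s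
      · simpa [pvFresh, hx] using ih h
      · rcases ih (s := s ++ [x]) h with hs | hf
        · rcases List.mem_append.mp hs with hs | hs
          · exact Or.inl hs
          · simp only [List.mem_singleton] at hs
            subst hs; simp [pvFresh, hx]
        · simp [pvFresh, hx, hf]

theorem nodup_append_pvFresh {s : List Int} (ns : List Int) (h : s.Nodup) :
    (s ++ pvFresh s ns).Nodup := by
  induction ns generalizing s with
  | nil => simpa [pvFresh]
  | cons e ns ih =>
    by_cases he : e ∈ s
    · simpa [pvFresh, he] using ih h
    · have hse : (s ++ [e]).Nodup := by
        rw [List.nodup_append]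
        refine ⟨h, by simp, fun a ha b hb => ?_⟩
        simp only [List.mem_singleton] at hb
        subst hb
        exact fun hab => he (hab ▸ ha)
      have : ((s ++ [e]) ++ pvFresh (s ++ [e]) ns).Nodup := ih hse
      simpa [pvFresh, he, List.append_assoc] using this

-- one element of A's inner for-loop over the neighbour list
theorem pvBfsA_inner (ns s q : List Int) :
    ns.foldl
      (fun (sq : PySem.Set Int × List Int) e =>
        if PySem.Set.contains sq.1 e then sq else (PySem.Set.add sq.1 e, sq.2 ++ [e]))
      (s, q)
    = (s ++ pvFresh s ns, q ++ pvFresh s ns) := by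
  induction ns generalizing s q with
  | nil => simp [pvFresh]
  | cons e ns ih =>
    by_cases he : e ∈ s
    · have hc : PySem.Set.contains s e = true := by simp [he]
      simp only [List.foldl_cons, hc, if_pos]
      rw [ih]
      simp [pvFresh, he]
    · have hc : PySem.Set.contains s e = false := by simp [he]
      simp only [List.foldl_cons, hc, Bool.false_eq_true, if_neg, not_false_iff,
        PySem.Set.add_of_not_mem he]
      rw [ih]
      simp [pvFresh, he, List.append_assoc]

-- B's inner for-loop over one neighbour list
theorem pvRoundNew_inner (ns r new : List Int) :
    ns.foldl (fun new e => if e ∈ r ∨ e ∈ new then new else new ++ [e]) new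
    = new ++ pvFresh (r ++ new) ns := by
  induction ns generalizing new with
  | nil => simp [pvFresh]
  | cons e ns ih =>
    by_cases he : e ∈ r ∨ e ∈ new
    · have : e ∈ r ++ new := List.mem_append.mpr he
      simp [pvFresh, this, he, ih]
    · have : ¬ e ∈ r ++ new := by simpa [List.mem_append] using he
      simp only [List.foldl_cons, he, if_neg, not_false_iff]
      rw [ih]
      simp [pvFresh, this, List.append_assoc]

-- one full sweep of B equals pvFresh of the concatenated neighbour lists
theorem pvRoundNew_aux (nbr : Int → List Int) (r : List Int) :
    ∀ (xs new : List Int),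
      xs.foldl
        (fun new x =>
          (nbr x).foldl (fun new e => if e ∈ r ∨ e ∈ new then new else new ++ [e]) new)
        new
      = new ++ pvFresh (r ++ new) (pvCat nbr xs) := by
  intro xs
  induction xs with
  | nil => intro new; simp [pvCat, pvFresh]
  | cons x xs ih =>
    intro new
    rw [List.foldl_cons, pvRoundNew_inner, ih]
    simp [pvCat, pvFresh_append, List.append_assoc]

theorem pvRoundNew_eq (nbr : Int → List Int) (r : List Int) :
    pvRoundNew nbr r = pvFresh r (pvCat nbr r) := by
  simpa using pvRoundNew_aux nbr r r []

-- processing the whole current queue segment of A = one sweep of B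
theorem pvBfsA_round (nbr : Int → List Int) :
    ∀ (pending extra done : List Int) (f : Nat),
      (∀ x ∈ done, ∀ e ∈ nbr x, e ∈ (done ++ pending) ++ extra) →
      pvBfsA nbr (pending.length + f) (pending ++ extra) (done ++ pending ++ extra)
      = pvBfsA nbr f
          (extra ++ pvFresh (done ++ pending ++ extra) (pvCat nbr pending))
          ((done ++ pending ++ extra) ++ pvFresh (done ++ pending ++ extra) (pvCat nbr pending)) := by
  intro pending
  induction pending with
  | nil => intro extra done f _; simp [pvCat, pvFresh]
  | cons x ps ih =>
    intro extra done f hcl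
    have hstep :
        pvBfsA nbr (List.length (x :: ps) + f) ((x :: ps) ++ extra) (done ++ (x :: ps) ++ extra)
        = pvBfsA nbr (ps.length + f)
            ((ps ++ extra) ++ pvFresh (done ++ (x :: ps) ++ extra) (nbr x))
            ((done ++ (x :: ps) ++ extra) ++ pvFresh (done ++ (x :: ps) ++ extra) (nbr x)) := by
      simp only [List.length_cons, Nat.succ_add, List.cons_append, pvBfsA, pvBfsA_inner]
    rw [hstep]
    set s := done ++ (x :: ps) ++ extra with hs
    set new1 := pvFresh s (nbr x) with hnew1
    have hre : (ps ++ extra) ++ new1 = ps ++ (extra ++ new1) := by simp [List.append_assoc]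
    have hse : s ++ new1 = (done ++ [x]) ++ ps ++ (extra ++ new1) := by
      simp [hs, List.append_assoc]
    have hcl' : ∀ y ∈ done ++ [x], ∀ e ∈ nbr y, e ∈ ((done ++ [x]) ++ ps) ++ (extra ++ new1) := by
      intro y hy e he
      rcases List.mem_append.mp hy with hy | hy
      · have := hcl y hy e he
        rw [hs] at this
        simp only [List.mem_append, List.mem_cons] at this ⊢
        tauto
      · simp only [List.mem_singleton] at hy; subst hy
        rcases mem_or_mem_pvFresh (s := s) he with hm | hm
        · simp only [hs, List.mem_append, List.mem_cons] at hm ⊢; tauto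
        · simp only [List.mem_append]; right; right; exact hm
    have := ih (extra ++ new1) (done ++ [x]) f hcl'
    rw [hre, hse, this]
    have hs2 : (done ++ [x]) ++ ps ++ (extra ++ new1) = s ++ new1 := hse.symm
    rw [hs2]
    have hfr : pvFresh s (pvCat nbr (x :: ps)) = new1 ++ pvFresh (s ++ new1) (pvCat nbr ps) := by
      have : pvCat nbr (x :: ps) = nbr x ++ pvCat nbr ps := by simp [pvCat]
      rw [this, pvFresh_append, ← hnew1]
    rw [hfr]
    simp [List.append_assoc]

-- a Nodup list included in tv has length at most tv.dedup.length
theorem nodup_length_le (l tv : List Int) (hnd : l.Nodup) (hsub : ∀ a ∈ l, a ∈ tv) :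
    l.length ≤ tv.dedup.length := by
  have h1 : l.length = l.toFinset.card := by rw [List.card_toFinset, hnd.dedup]
  have h2 : l.toFinset ⊆ tv.toFinset := by
    intro a ha
    simp only [List.mem_toFinset] at ha ⊢
    exact hsub a ha
  calc l.length = l.toFinset.card := h1
    _ ≤ tv.toFinset.card := Finset.card_le_card h2
    _ = tv.dedup.length := List.card_toFinset tv

-- the main synchronisation: BFS with enough fuel equals the round closure with enough fuel
theorem pv_main (nbr : Int → List Int) (tv : List Int)
    (hnbr : ∀ x, ∀ e ∈ nbr x, e ∈ tv) :
    ∀ (fB : Nat) (done pending : List Int) (fA : Nat),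
      (∀ x ∈ done, ∀ e ∈ nbr x, e ∈ done ++ pending) →
      (done ++ pending).Nodup →
      (∀ a ∈ done ++ pending, a ∈ tv) →
      tv.dedup.length - done.length ≤ fA →
      tv.dedup.length - (done ++ pending).length < fB →
      pvBfsA nbr fA pending (done ++ pending) = pvRounds nbr fB (done ++ pending) := by
  intro fB
  induction fB with
  | zero => intro done pending fA _ _ _ _ hB; omega
  | succ f ih =>
    intro done pending fA hcl hnd hsub hA hB
    set r := done ++ pending with hr
    have hrlen : r.length ≤ tv.dedup.length := nodup_length_le r tv hnd hsub
    have hplen : pending.length ≤ fA := by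
      have : r.length = done.length + pending.length := by simp [hr]
      omega
    set new := pvFresh r (pvCat nbr pending) with hnew
    -- A processes the whole pending segment
    have hAstep : pvBfsA nbr fA pending r = pvBfsA nbr (fA - pending.length) new (r ++ new) := by
      have hfa : fA = pending.length + (fA - pending.length) := by omega
      have := pvBfsA_round nbr pending [] done (fA - pending.length)
        (by intro x hx e he
            have hm := hcl x hx e he
            rw [hr] at hm
            simpa using hm)
      simp only [List.append_nil] at this
      rw [hfa, this]
      simp [hr, hnew, List.append_assoc]
    -- B's sweep over r equals new
    have hBstep : pvRoundNew nbr r = new := by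
      rw [pvRoundNew_eq]
      have hcat : pvCat nbr r = pvCat nbr done ++ pvCat nbr pending := by
        simp [pvCat, hr]
      rw [hcat, pvFresh_append]
      have hdone : pvFresh r (pvCat nbr done) = [] := by
        apply pvFresh_nil_of_subset
        intro e he
        rcases List.mem_flatMap.mp he with ⟨x, hx, hex⟩
        exact hcl x hx e hex
      rw [hdone]
      simp [hnew]
    by_cases hemp : new = []
    · -- both stop
      rw [hAstep, hemp, List.append_nil]
      have hA0 : ∀ g s, pvBfsA nbr g [] s = s := by
        intro g s; cases g <;> rfl
      rw [hA0]
      simp [pvRounds, hBstep, hemp]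
    · -- both continue with r ++ new
      have hnd' : (r ++ new).Nodup := by
        simpa [hnew] using nodup_append_pvFresh (pvCat nbr pending) hnd
      have hsub' : ∀ a ∈ r ++ new, a ∈ tv := by
        intro a ha
        rcases List.mem_append.mp ha with ha | ha
        · exact hsub a ha
        · rcases mem_pvFresh ha with ⟨hin, _⟩
          rcases List.mem_flatMap.mp hin with ⟨x, _, hex⟩
          exact hnbr x a hex
      have hcl' : ∀ x ∈ r, ∀ e ∈ nbr x, e ∈ r ++ new := by
        intro x hx e he
        rcases List.mem_append.mp hx with hx | hx
        · exact List.mem_append.mpr (Or.inl (hcl x hx e he))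
        · have : e ∈ pvCat nbr pending := List.mem_flatMap.mpr ⟨x, hx, he⟩
          rcases mem_or_mem_pvFresh (s := r) this with hm | hm
          · exact List.mem_append.mpr (Or.inl hm)
          · exact List.mem_append.mpr (Or.inr hm)
      have hlen' : (r ++ new).length ≤ tv.dedup.length := nodup_length_le _ tv hnd' hsub'
      have hnewlen : 1 ≤ new.length := by
        cases hn : new with
        | nil => exact absurd hn hemp
        | cons _ _ => simp
      have hrl : r.length = done.length + pending.length := by
        rw [hr, List.length_append]
      have hih := ih r new (fA - pending.length) hcl' hnd' hsub'
        (by omega)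
        (by simp only [List.length_append] at hlen' ⊢; omega)
      rw [hAstep, hih]
      simp [pvRounds, hBstep, hemp]

-- pvRounds keeps the result Nodup
theorem pvRounds_nodup (nbr : Int → List Int) :
    ∀ (f : Nat) (r : List Int), r.Nodup → (pvRounds nbr f r).Nodup := by
  intro f
  induction f with
  | zero => intro r h; exact h
  | succ f ih =>
    intro r h
    simp only [pvRounds]
    split
    · exact h
    · apply ih
      rw [pvRoundNew_eq]
      exact nodup_append_pvFresh _ h

-- every value returned by a dict lookup is one of set_list's listed values
theorem dict_values_sub (l : List (Int × List Int)) :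
    ∀ (d0 : PySem.Dict Int (List Int)) (w : List Int),
      w ∈ (l.foldl (fun d p => d.insert p.1 p.2) d0).values → w ∈ d0.values ∨ w ∈ l.map (fun p => p.2) := by
  induction l with
  | nil => intro d0 w h; exact Or.inl h
  | cons p l ih =>
    intro d0 w h
    rcases ih (d0.insert p.1 p.2) w h with h | h
    · rcases PySem.Dict.mem_values_insert d0 p.1 p.2 w h with h | h
      · exact Or.inr (by simp [h])
      · exact Or.inl h
    · exact Or.inr (by simp only [List.map_cons, List.mem_cons]; exact Or.inr h)

theorem mem_getD_ofList {l : List (Int × List Int)} {x e : Int}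
    (h : e ∈ (PySem.Dict.ofList l).getD x []) : e ∈ l.flatMap (fun p => p.2) := by
  rw [PySem.Dict.getD_eq_get?_getD] at h
  cases hg : (PySem.Dict.ofList l).get? x with
  | none => rw [hg] at h; simp at h
  | some v =>
    rw [hg] at h
    simp only [Option.getD_some] at h
    have hit : (x, v) ∈ (PySem.Dict.ofList l).items := PySem.Dict.mem_items_of_get?_eq_some _ hg
    have hv : v ∈ (PySem.Dict.ofList l).values := by
      simp only [PySem.Dict.values]
      exact List.mem_map.mpr ⟨(x, v), hit, rfl⟩
    have : v ∈ (PySem.Dict.empty : PySem.Dict Int (List Int)).values ∨ v ∈ l.map (fun p => p.2) :=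
      dict_values_sub l PySem.Dict.empty v hv
    rcases this with hc | hc
    · exact absurd hc (by simp [PySem.Dict.empty, PySem.Dict.values])
    · rcases List.mem_map.mp hc with ⟨q, hq, rfl⟩
      exact List.mem_flatMap.mpr ⟨q, hq, h⟩

-- ===== VERDICT (by name: the statement is the Claim_ definition above) =====
theorem get_need_build_spec : Claim_equal_get_need_build := by
  intro target set_list _ _
  unfold Spec_get_need_build get_need_build get_need_build_alt
  set nbr : Int → List Int := fun x => (PySem.Dict.ofList set_list).getD x [] with hnbr
  set tv : List Int := target :: set_list.flatMap (fun p => p.2) with htv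
  set N : Nat := 1 + (set_list.map (fun p => p.2.length)).sum with hN
  have hnbrtv : ∀ x, ∀ e ∈ nbr x, e ∈ tv := by
    intro x e he
    simp only [htv, List.mem_cons]
    exact Or.inr (mem_getD_ofList he)
  have hinit : PySem.Set.add PySem.Set.empty target = [target] := by
    simp [PySem.Set.add_of_not_mem, PySem.Set.empty]
  have hbound : tv.dedup.length ≤ N := by
    have h1 : tv.dedup.length ≤ tv.length := (List.dedup_sublist tv).length_le
    have h2 : tv.length = 1 + (set_list.map (fun p => p.2.length)).sum := by
      simp [htv, List.length_flatMap, Nat.add_comm]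
    omega
  have hmain := pv_main nbr tv hnbrtv N [] [target] N
    (by intro x hx; simp at hx)
    (by simp)
    (by intro a ha; simp only [List.nil_append, List.mem_singleton] at ha; simp [htv, ha])
    (by simp; omega)
    (by simp only [List.nil_append, List.length_singleton]; omega)
  simp only [List.nil_append] at hmain
  rw [hinit, hmain]
  exact (PySem.Set.ofList_eq_self_of_nodup _ (pvRounds_nodup nbr N [target] (by simp))).symm
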